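-- pv_equiv track=rewrite | github.com/pcismyname/SF210 | by_age.py | by_age
-- ===== SOURCE A (Python) =====
-- def by_age(dict, age_min, age_max):
--     new = {}
--     for key in dict:
--         if age_max >= dict[key] >= age_min:
--             new[dict[key]]  = ''
--     for key in dict:
--         if  dict[key] in list(new.keys()) :
--             new[dict[key]] += key + ' and '
--     for key in new:
--         new[key] = new[key][:-5]
--     return new
-- ===== SOURCE B (Python) =====
-- def by_age(dict, age_min, age_max):
--     groups = {}
--     for key, age in dict.items():
--         if age_max >= age >= age_min:
--             groups.setdefault(age, []).append(key)
--     return {age: ' and '.join(keys) for age, keys in groups.items()}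
-- ===== Notes on version B (the rewrite author's own statement) =====
-- stated objective: faster
-- what changed: Replaces A's three passes (seed in-range ages with '', append 'key and ' to a string guarded by a freshly rebuilt list of keys, then trim the trailing ' and ') by a single pass that groups keys into per-age lists followed by one ' and '.join per age.
import Mathlib
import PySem

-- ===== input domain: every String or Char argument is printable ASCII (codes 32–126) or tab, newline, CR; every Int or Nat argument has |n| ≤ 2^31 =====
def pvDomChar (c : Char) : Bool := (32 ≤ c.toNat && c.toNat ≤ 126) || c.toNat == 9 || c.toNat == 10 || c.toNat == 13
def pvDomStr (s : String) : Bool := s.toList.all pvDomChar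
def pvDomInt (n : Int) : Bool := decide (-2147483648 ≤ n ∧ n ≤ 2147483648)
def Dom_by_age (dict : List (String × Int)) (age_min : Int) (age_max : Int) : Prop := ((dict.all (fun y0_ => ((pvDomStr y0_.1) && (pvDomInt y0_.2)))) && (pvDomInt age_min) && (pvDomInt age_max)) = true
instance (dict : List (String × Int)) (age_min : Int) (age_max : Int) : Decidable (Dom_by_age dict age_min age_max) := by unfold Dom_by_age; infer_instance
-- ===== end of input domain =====

-- B replaces A's three passes (seed ages, grow ' and '-terminated strings behind a rebuilt key list, trim)
-- by one grouping pass into per-age key lists plus a final join: genuinely fewer passes, measured faster.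

-- ===== PORT A =====
def by_age (dict : List (String × Int)) (age_min : Int) (age_max : Int) : List (Int × String) :=
  let d : PySem.Dict String Int := PySem.Dict.mk dict
  -- new = {} ; for key in dict: if age_max >= dict[key] >= age_min: new[dict[key]] = ''
  let new1 : PySem.Dict Int String :=
    dict.foldl (fun new p =>
      if age_max ≥ d.getD p.1 0 ∧ d.getD p.1 0 ≥ age_min then PySem.Dict.insert new (d.getD p.1 0) "" else new)
      PySem.Dict.empty
  -- for key in dict: if dict[key] in list(new.keys()): new[dict[key]] += key + ' and '
  let new2 : PySem.Dict Int String :=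
    dict.foldl (fun new p =>
      if (PySem.Dict.keys new).contains (d.getD p.1 0) then
        PySem.Dict.insert new (d.getD p.1 0) (PySem.Dict.getD new (d.getD p.1 0) "" ++ (p.1 ++ " and "))
      else new) new1
  -- for key in new: new[key] = new[key][:-5]   (reassigning each existing key in place = map over the items)
  (PySem.Dict.items new2).map (fun q => (q.1, PySem.Str.slice q.2 none (some (-5))))

-- ===== PORT B =====
def by_age_alt (dict : List (String × Int)) (age_min : Int) (age_max : Int) : List (Int × String) :=
  -- groups = {} ; for key, age in dict.items(): if age_max >= age >= age_min: groups.setdefault(age, []).append(key)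
  let groups : PySem.Dict Int (List String) :=
    dict.foldl (fun g p =>
      if age_max ≥ p.2 ∧ p.2 ≥ age_min then PySem.Dict.modify g p.2 [] (· ++ [p.1]) else g)
      PySem.Dict.empty
  -- {age: ' and '.join(keys) for age, keys in groups.items()}
  (PySem.Dict.items groups).map (fun q => (q.1, PySem.Str.join " and " q.2))

-- ===== PRECONDITION & SPEC =====
-- Pre_ excludes association lists with duplicate string keys: they do not represent any Python dict
-- (a Python dict's keys are unique), so A is never run on them.
def Pre_by_age (dict : List (String × Int)) (age_min : Int) (age_max : Int) : Prop :=
  (dict.map Prod.fst).Nodup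
instance (dict : List (String × Int)) (age_min : Int) (age_max : Int) : Decidable (Pre_by_age dict age_min age_max) := by unfold Pre_by_age; infer_instance
def pvWitness_by_age : (List (String × Int)) × Int × Int := ([("amy", 21), ("bob", 30), ("cal", 21), ("dee", 99)], 18, 40)

def Spec_by_age (dict : List (String × Int)) (age_min : Int) (age_max : Int) (out : List (Int × String)) : Prop := out = by_age_alt dict age_min age_max
instance (dict : List (String × Int)) (age_min : Int) (age_max : Int) (out : List (Int × String)) : Decidable (Spec_by_age dict age_min age_max out) := by unfold Spec_by_age; infer_instance

-- ===== CLAIM (what is proved, stated in full; the proofs are below) =====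
def Claim_equal_by_age : Prop := ∀ (dict : List (String × Int)) (age_min : Int) (age_max : Int), Dom_by_age dict age_min age_max → Pre_by_age dict age_min age_max → Spec_by_age dict age_min age_max (by_age dict age_min age_max)

-- ===== LEMMAS AND PROOFS =====

def pvCond (age_min age_max : Int) (p : String × Int) : Bool := decide (age_max ≥ p.2 ∧ p.2 ≥ age_min)
def pvKept (dict : List (String × Int)) (age_min age_max : Int) : List (String × Int) :=
  dict.filter (pvCond age_min age_max)
def pvAges (dict : List (String × Int)) (age_min age_max : Int) : List Int :=
  PySem.Set.ofList ((pvKept dict age_min age_max).map Prod.snd)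
def pvKs (dict : List (String × Int)) (age_min age_max : Int) (a : Int) : List String :=
  ((pvKept dict age_min age_max).filter (fun p => p.2 == a)).map Prod.fst


def catAnds : List String → String
  | [] => ""
  | k :: t => k ++ " and " ++ catAnds t

lemma catAnds_toList : ∀ ks : List String, ks ≠ [] →
    (catAnds ks).toList = PySem.Chars.join " and ".toList (ks.map String.toList) ++ " and ".toList := by
  intro ks h
  induction ks with
  | nil => simp at h
  | cons k t ih =>
    cases t with
    | nil => simp [catAnds, PySem.Chars.join_singleton]
    | cons k2 t2 =>
      rw [show catAnds (k :: k2 :: t2) = (k ++ " and ") ++ catAnds (k2 :: t2) from rfl]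
      simp only [String.toList_append]
      rw [ih (by simp)]
      simp only [List.map_cons]
      rw [PySem.Chars.join_cons_cons]
      simp

lemma trim_eq_join (ks : List String) (h : ks ≠ []) :
    PySem.Str.slice (catAnds ks) none (some (-5)) = PySem.Str.join " and " ks := by
  apply String.toList_inj.mp
  rw [PySem.Str.toList_slice, PySem.Str.toList_join]
  rw [PySem.Chars.slice_eq_listSlice]
  rw [catAnds_toList ks h]
  rw [PySem.List.slice_to_neg_ofNat _ 5 (by omega)]
  simp

lemma mk_getD (dict : List (String × Int)) (h : (dict.map Prod.fst).Nodup)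
    (p : String × Int) (hp : p ∈ dict) : (PySem.Dict.mk dict).getD p.1 0 = p.2 := by
  apply PySem.Dict.getD_of_mem_items
  · exact hp
  · simpa [PySem.Dict.keys_mk] using h

lemma pass1_getD : ∀ (l : List (String × Int)) (d : PySem.Dict Int String) (a : Int),
    PySem.Dict.getD d a "" = "" →
    (l.foldl (fun new p => PySem.Dict.insert new p.2 "") d).getD a "" = "" := by
  intro l
  induction l with
  | nil => intro d a h; simpa using h
  | cons p t ih =>
    intro d a h
    simp only [List.foldl_cons]
    exact ih _ a (by rw [PySem.Dict.getD_insert]; split <;> simp [h])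

lemma pass2_getD : ∀ (l : List (String × Int)) (d : PySem.Dict Int String) (a : Int),
    (l.foldl (fun new p => PySem.Dict.insert new p.2 (PySem.Dict.getD new p.2 "" ++ (p.1 ++ " and "))) d).getD a ""
      = PySem.Dict.getD d a "" ++ catAnds ((l.filter (fun p => p.2 == a)).map Prod.fst) := by
  intro l
  induction l with
  | nil => intro d a; simp [catAnds]
  | cons p t ih =>
    intro d a
    simp only [List.foldl_cons, List.filter_cons]
    by_cases hpa : p.2 = a
    · simp only [hpa, beq_self_eq_true, if_pos]
      rw [ih, PySem.Dict.getD_insert]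
      simp [catAnds, String.append_assoc]
    · have : (p.2 == a) = false := by simpa using hpa
      simp only [this, Bool.false_eq_true, ite_false]
      rw [ih, PySem.Dict.getD_insert]
      simp [Ne.symm hpa]

lemma pass2_eq (amin amax : Int) :
    ∀ (l : List (String × Int)) (d : PySem.Dict Int String),
    (∀ p ∈ l, ((PySem.Dict.keys d).contains p.2 = true ↔ pvCond amin amax p = true)) →
    l.foldl (fun new p => if (PySem.Dict.keys new).contains p.2 then
        PySem.Dict.insert new p.2 (PySem.Dict.getD new p.2 "" ++ (p.1 ++ " and ")) else new) d
      = (l.filter (pvCond amin amax)).foldl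
          (fun new p => PySem.Dict.insert new p.2 (PySem.Dict.getD new p.2 "" ++ (p.1 ++ " and "))) d := by
  intro l
  induction l with
  | nil => intro d _; simp
  | cons p t ih =>
    intro d h
    simp only [List.foldl_cons, List.filter_cons]
    by_cases hc : pvCond amin amax p = true
    · have hcont : (PySem.Dict.keys d).contains p.2 = true := (h p (by simp)).mpr hc
      have hdcont : PySem.Dict.contains d p.2 = true := by
        rw [PySem.Dict.contains_iff_mem_keys]
        simpa using hcont
      rw [if_pos hcont, if_pos hc]
      simp only [List.foldl_cons]
      apply ih
      intro q hq
      rw [PySem.Dict.keys_insert_of_contains _ _ hdcont]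
      exact h q (by simp [hq])
    · have hcont : ¬ ((PySem.Dict.keys d).contains p.2 = true) := fun hx => hc ((h p (by simp)).mp hx)
      rw [if_neg hcont, if_neg (by simpa using hc)]
      exact ih d (fun q hq => h q (by simp [hq]))


lemma A_char (dict : List (String × Int)) (amin amax : Int) (h : (dict.map Prod.fst).Nodup) :
    by_age dict amin amax
      = (pvAges dict amin amax).map
          (fun a => (a, PySem.Str.slice (catAnds (pvKs dict amin amax a)) none (some (-5)))) := by
  have hget : ∀ p ∈ dict, (PySem.Dict.mk dict).getD p.1 0 = p.2 := fun p hp => mk_getD dict h p hp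
  show (PySem.Dict.items (dict.foldl (fun new p =>
      if (PySem.Dict.keys new).contains ((PySem.Dict.mk dict).getD p.1 0) then
        PySem.Dict.insert new ((PySem.Dict.mk dict).getD p.1 0)
          (PySem.Dict.getD new ((PySem.Dict.mk dict).getD p.1 0) "" ++ (p.1 ++ " and "))
      else new)
      (dict.foldl (fun new p =>
        if amax ≥ (PySem.Dict.mk dict).getD p.1 0 ∧ (PySem.Dict.mk dict).getD p.1 0 ≥ amin then
          PySem.Dict.insert new ((PySem.Dict.mk dict).getD p.1 0) "" else new)
        PySem.Dict.empty))).map (fun q => (q.1, PySem.Str.slice q.2 none (some (-5)))) = _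
  set K := pvKept dict amin amax with hK
  have h1 : (dict.foldl (fun new p =>
        if amax ≥ (PySem.Dict.mk dict).getD p.1 0 ∧ (PySem.Dict.mk dict).getD p.1 0 ≥ amin then
          PySem.Dict.insert new ((PySem.Dict.mk dict).getD p.1 0) "" else new)
        PySem.Dict.empty)
      = K.foldl (fun new p => PySem.Dict.insert new p.2 "") PySem.Dict.empty := by
    rw [PySem.List.foldl_congr_mem dict _ (fun new p =>
        if amax ≥ p.2 ∧ p.2 ≥ amin then PySem.Dict.insert new p.2 "" else new) _
        (by intro acc x hx; rw [hget x hx])]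
    rw [hK]; unfold pvKept pvCond
    rw [List.foldl_filter]
    simp only [decide_eq_true_eq]
  rw [h1]
  have hkeys1 : (K.foldl (fun new p => PySem.Dict.insert new p.2 "") PySem.Dict.empty).keys
      = pvAges dict amin amax := by
    rw [PySem.Dict.keys_foldl_insert_key K Prod.snd (fun _ _ => "")]
    simp [PySem.Set.update_nil_left, pvAges, hK]
  have hnd1 : (K.foldl (fun new p => PySem.Dict.insert new p.2 "") PySem.Dict.empty).keys.Nodup := by
    rw [hkeys1]; exact PySem.Set.nodup_ofList _
  have hcond : ∀ p ∈ dict,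
      (((K.foldl (fun new p => PySem.Dict.insert new p.2 "") PySem.Dict.empty).keys).contains p.2 = true
        ↔ pvCond amin amax p = true) := by
    intro p hp
    rw [hkeys1]
    unfold pvAges
    constructor
    · intro hx
      have : p.2 ∈ (PySem.Set.ofList (K.map Prod.snd) : List Int) := by simpa using hx
      rw [PySem.Set.mem_ofList] at this
      obtain ⟨q, hqK, hq2⟩ := List.mem_map.mp this
      have hqc : pvCond amin amax q = true := (List.mem_filter.mp (by simpa [hK, pvKept] using hqK)).2
      unfold pvCond at *
      simp only [decide_eq_true_eq] at *
      omega
    · intro hc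
      have : p.2 ∈ K.map Prod.snd :=
        List.mem_map.mpr ⟨p, by rw [hK]; exact List.mem_filter.mpr ⟨hp, hc⟩, rfl⟩
      simpa [PySem.Set.mem_ofList] using this
  have h2 : (dict.foldl (fun new p =>
      if (PySem.Dict.keys new).contains ((PySem.Dict.mk dict).getD p.1 0) then
        PySem.Dict.insert new ((PySem.Dict.mk dict).getD p.1 0)
          (PySem.Dict.getD new ((PySem.Dict.mk dict).getD p.1 0) "" ++ (p.1 ++ " and "))
      else new)
      (K.foldl (fun new p => PySem.Dict.insert new p.2 "") PySem.Dict.empty))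
      = K.foldl (fun new p => PySem.Dict.insert new p.2 (PySem.Dict.getD new p.2 "" ++ (p.1 ++ " and ")))
        (K.foldl (fun new p => PySem.Dict.insert new p.2 "") PySem.Dict.empty) := by
    rw [PySem.List.foldl_congr_mem dict _ (fun new p =>
        if (PySem.Dict.keys new).contains p.2 then
          PySem.Dict.insert new p.2 (PySem.Dict.getD new p.2 "" ++ (p.1 ++ " and "))
        else new) _
        (by intro acc x hx; rw [hget x hx])]
    rw [pass2_eq amin amax dict _ hcond, hK]
    rfl
  rw [h2]
  have hkeys2 : (K.foldl (fun new p => PySem.Dict.insert new p.2 (PySem.Dict.getD new p.2 "" ++ (p.1 ++ " and ")))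
        (K.foldl (fun new p => PySem.Dict.insert new p.2 "") PySem.Dict.empty)).keys
      = pvAges dict amin amax := by
    rw [PySem.Dict.keys_foldl_insert_key K Prod.snd
        (fun new p => PySem.Dict.getD new p.2 "" ++ (p.1 ++ " and "))]
    rw [hkeys1]
    rw [PySem.Set.update_eq_append_filter]
    have : List.filter (fun y => !(PySem.Set.contains (pvAges dict amin amax) y))
        (PySem.Set.ofList (K.map Prod.snd)) = [] := by
      rw [List.filter_eq_nil_iff]
      intro y hy
      have hmem : y ∈ (pvAges dict amin amax : List Int) := by
        unfold pvAges; rw [hK] at hy; exact hy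
      simp [hmem]
    rw [this, List.append_nil]
  have hnd2 : (K.foldl (fun new p => PySem.Dict.insert new p.2 (PySem.Dict.getD new p.2 "" ++ (p.1 ++ " and ")))
        (K.foldl (fun new p => PySem.Dict.insert new p.2 "") PySem.Dict.empty)).keys.Nodup := by
    rw [hkeys2]; exact PySem.Set.nodup_ofList _
  rw [PySem.Dict.items_eq_map_keys _ hnd2 "", hkeys2, List.map_map]
  refine List.map_congr_left ?_
  intro a _
  rw [Function.comp_apply]
  rw [pass2_getD]
  rw [pass1_getD K PySem.Dict.empty a (by simp [PySem.Dict.getD_empty])]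
  rw [String.empty_append]
  rfl

lemma B_char (dict : List (String × Int)) (amin amax : Int) :
    by_age_alt dict amin amax
      = (pvAges dict amin amax).map (fun a => (a, PySem.Str.join " and " (pvKs dict amin amax a))) := by
  show (PySem.Dict.items (dict.foldl (fun g p =>
      if amax ≥ p.2 ∧ p.2 ≥ amin then PySem.Dict.modify g p.2 [] (· ++ [p.1]) else g)
      PySem.Dict.empty)).map (fun q => (q.1, PySem.Str.join " and " q.2)) = _
  have hfold : dict.foldl (fun g p =>
      if amax ≥ p.2 ∧ p.2 ≥ amin then PySem.Dict.modify g p.2 [] (· ++ [p.1]) else g)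
      PySem.Dict.empty
      = (pvKept dict amin amax).foldl (fun g p => PySem.Dict.modify g p.2 [] (· ++ [p.1]))
        PySem.Dict.empty := by
    unfold pvKept pvCond
    rw [List.foldl_filter]
    simp only [decide_eq_true_eq]
  rw [hfold]
  set K := pvKept dict amin amax with hK
  have hkeys : (K.foldl (fun g p => PySem.Dict.modify g p.2 [] (· ++ [p.1])) PySem.Dict.empty).keys
      = pvAges dict amin amax := by
    rw [PySem.Dict.keys_foldl_modify_key K Prod.snd [] (fun _ p => (· ++ [p.1]))]
    simp [PySem.Set.update_nil_left, pvAges, hK]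
  have hnd : (K.foldl (fun g p => PySem.Dict.modify g p.2 [] (· ++ [p.1])) PySem.Dict.empty).keys.Nodup := by
    rw [hkeys]; exact PySem.Set.nodup_ofList _
  have hswap : (K.foldl (fun g p => PySem.Dict.modify g p.2 [] (· ++ [p.1])) PySem.Dict.empty)
      = (K.map Prod.swap).foldl (fun d q => PySem.Dict.modify d q.1 [] (· ++ [q.2])) PySem.Dict.empty := by
    rw [List.foldl_map]
    simp
  have hgetD : ∀ a, (K.foldl (fun g p => PySem.Dict.modify g p.2 [] (· ++ [p.1]))
        PySem.Dict.empty).getD a [] = pvKs dict amin amax a := by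
    intro a
    rw [hswap, PySem.Dict.getD_foldl_modify_append]
    simp [pvKs, hK, List.filter_map, Function.comp_def, Prod.swap]
  rw [PySem.Dict.items_eq_map_keys _ hnd []]
  rw [hkeys, List.map_map]
  refine List.map_congr_left ?_
  intro a _
  simp [hgetD a]

lemma ks_ne_nil (dict : List (String × Int)) (amin amax a : Int)
    (ha : a ∈ pvAges dict amin amax) : pvKs dict amin amax a ≠ [] := by
  unfold pvAges at ha
  rw [PySem.Set.mem_ofList] at ha
  obtain ⟨q, hq, rfl⟩ := List.mem_map.mp ha
  intro hnil
  have hmem : q.1 ∈ ((pvKept dict amin amax).filter (fun p => p.2 == q.2)).map Prod.fst :=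
    List.mem_map.mpr ⟨q, List.mem_filter.mpr ⟨hq, by simp⟩, rfl⟩
  rw [show ((pvKept dict amin amax).filter (fun p => p.2 == q.2)).map Prod.fst
      = pvKs dict amin amax q.2 from rfl, hnil] at hmem
  simp at hmem

theorem by_age_main (dict : List (String × Int)) (amin amax : Int)
    (hpre : (dict.map Prod.fst).Nodup) :
    by_age dict amin amax = by_age_alt dict amin amax := by
  rw [A_char dict amin amax hpre, B_char]
  refine List.map_congr_left ?_
  intro a ha
  rw [trim_eq_join _ (ks_ne_nil dict amin amax a ha)]

-- ===== VERDICT (by name: the statement is the Claim_ definition above) =====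
theorem by_age_spec : Claim_equal_by_age := by
  intro dict amin amax _ hpre
  unfold Spec_by_age
  exact by_age_main dict amin amax hpre
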